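-- pv_equiv track=rewrite | github.com/invaderskywalker/data_engineer | src/trmeric_services/scoring/explanation_generator.py | _format_risk_details
-- ===== SOURCE A (Python) =====
-- def _format_risk_details(risks: list) -> str:
--     """Format risk details for explanation context."""
--     if not risks:
--         return "- No identified risks"
--
--     by_severity = {"high": [], "medium": [], "low": []}
--
--     for risk in risks:
--         severity = risk.get("severity", "medium").lower()
--         name = risk.get("name", "Unnamed Risk")
--         description = risk.get("description", "")
--
--         if severity not in by_severity:
--             severity = "medium"
--
--         desc_text = f" - {description[:60]}" if description else ""
--         by_severity[severity].append(f"{name}{desc_text}")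
--
--     lines = []
--     for severity in ["high", "medium", "low"]:
--         if by_severity[severity]:
--             lines.append(f"\n{severity.upper()} ({len(by_severity[severity])}):")
--             for risk in by_severity[severity]:
--                 lines.append(f"  - {risk}")
--
--     total_risks = sum(len(v) for v in by_severity.values())
--     summary = f"\nTotal: {total_risks} risks"
--     return "".join(lines) + summary if lines else "- No risks categorized" + summary
-- ===== SOURCE B (Python) =====
-- def _format_risk_details(risks: list) -> str:
--     """Format risk details for explanation context."""
--     if not risks:
--         return "- No identified risks"
--     out = ""
--     for sev in ["high", "medium", "low"]:
--         group = []
--         for risk in risks: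
--             s = risk.get("severity", "medium").lower()
--             if s not in ("high", "medium", "low"):
--                 s = "medium"
--             if s == sev:
--                 description = risk.get("description", "")
--                 desc_text = f" - {description[:60]}" if description else ""
--                 group.append(f"{risk.get('name', 'Unnamed Risk')}{desc_text}")
--         if group:
--             out += f"\n{sev.upper()} ({len(group)}):"
--             for g in group:
--                 out += f"  - {g}"
--     return out + f"\nTotal: {len(risks)} risks"
-- ===== Notes on version B (the rewrite author's own statement) =====
-- stated objective: simpler
-- what changed: Drops the severity-keyed dict of buckets and the separate lines list: a single outer loop over the fixed order high/medium/low filters the risk list per severity and appends its header and bullets directly to the output string, with the total taken as len(risks).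
import Mathlib
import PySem

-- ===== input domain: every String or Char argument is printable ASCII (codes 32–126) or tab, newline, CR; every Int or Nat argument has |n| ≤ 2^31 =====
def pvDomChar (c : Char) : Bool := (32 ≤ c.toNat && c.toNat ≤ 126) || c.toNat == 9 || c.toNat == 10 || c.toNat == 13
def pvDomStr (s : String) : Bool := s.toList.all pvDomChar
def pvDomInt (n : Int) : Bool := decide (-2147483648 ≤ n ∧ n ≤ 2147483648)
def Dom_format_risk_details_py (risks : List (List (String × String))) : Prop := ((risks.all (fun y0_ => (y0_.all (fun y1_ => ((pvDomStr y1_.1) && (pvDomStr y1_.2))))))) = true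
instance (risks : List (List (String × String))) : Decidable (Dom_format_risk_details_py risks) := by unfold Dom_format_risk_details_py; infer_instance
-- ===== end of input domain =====

-- B replaces A's severity-keyed dict of buckets by a single outer loop over the fixed
-- severity order that filters the risk list per severity (objective: simpler decomposition).

-- ===== PORT A =====
-- the normalized severity of one risk (A's two lines: .get("severity","medium").lower(),
-- then the membership test in by_severity — whose keys are constantly high/medium/low)
def aSeverity (risk : List (String × String)) : String :=
  let severity := PySem.Str.lower (PySem.Dict.getD (PySem.Dict.mk risk) "severity" "medium")
  if ¬ (severity = "high" ∨ severity = "medium" ∨ severity = "low") then "medium" else severity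

-- the bucket entry string A appends: f"{name}{desc_text}"
def aEntry (risk : List (String × String)) : String :=
  let name := PySem.Dict.getD (PySem.Dict.mk risk) "name" "Unnamed Risk"
  let description := PySem.Dict.getD (PySem.Dict.mk risk) "description" ""
  let desc_text := if description ≠ "" then " - " ++ PySem.Str.slice description none (some 60) else ""
  name ++ desc_text

def format_risk_details_py (risks : List (List (String × String))) : String :=
  if risks = [] then "- No identified risks" else
  -- by_severity = {"high": [], "medium": [], "low": []}, represented as its three entry lists;
  -- by_severity[severity].append(...) appends to the bucket whose key equals severity
  let bs := risks.foldl (fun (bs : List String × List String × List String) risk =>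
      let severity := aSeverity risk
      let entry := aEntry risk
      (if severity = "high" then bs.1 ++ [entry] else bs.1,
       if severity = "medium" then bs.2.1 ++ [entry] else bs.2.1,
       if severity = "low" then bs.2.2 ++ [entry] else bs.2.2)) ([], [], [])
  let lines := (["high", "medium", "low"] : List String).foldl (fun lines severity =>
      let group := if severity = "high" then bs.1 else if severity = "medium" then bs.2.1 else bs.2.2
      if group ≠ [] then
        group.foldl (fun lines risk => lines ++ ["  - " ++ risk])
          (lines ++ ["\n" ++ PySem.Str.upper severity ++ " (" ++ PySem.Int.toStr (group.length : Int) ++ "):"])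
      else lines) ([] : List String)
  let total_risks : Int := (bs.1.length : Int) + (bs.2.1.length : Int) + (bs.2.2.length : Int)
  let summary := "\nTotal: " ++ PySem.Int.toStr total_risks ++ " risks"
  if lines ≠ [] then PySem.Str.join "" lines ++ summary else "- No risks categorized" ++ summary

-- ===== PORT B =====
-- does this risk's normalized severity equal sev?
def bKeep (risk : List (String × String)) (sev : String) : Bool :=
  let s := PySem.Str.lower (PySem.Dict.getD (PySem.Dict.mk risk) "severity" "medium")
  let s := if s = "high" ∨ s = "medium" ∨ s = "low" then s else "medium"
  s == sev

-- f"{risk.get('name', 'Unnamed Risk')}{desc_text}"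
def bEntry (risk : List (String × String)) : String :=
  let description := PySem.Dict.getD (PySem.Dict.mk risk) "description" ""
  PySem.Dict.getD (PySem.Dict.mk risk) "name" "Unnamed Risk" ++
    (if description ≠ "" then " - " ++ PySem.Str.slice description none (some 60) else "")

def format_risk_details_py_alt (risks : List (List (String × String))) : String :=
  if risks = [] then "- No identified risks" else
  let out := (["high", "medium", "low"] : List String).foldl (fun out sev =>
      let group := risks.foldl (fun g risk => if bKeep risk sev then g ++ [bEntry risk] else g) []
      if group ≠ [] then
        group.foldl (fun o g => o ++ "  - " ++ g)
          (out ++ ("\n" ++ PySem.Str.upper sev ++ " (" ++ PySem.Int.toStr (group.length : Int) ++ "):"))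
      else out) ""
  out ++ ("\nTotal: " ++ PySem.Int.toStr (risks.length : Int) ++ " risks")

-- ===== PRECONDITION & SPEC =====
def Spec_format_risk_details_py (risks : List (List (String × String))) (out : String) : Prop := out = format_risk_details_py_alt risks
instance (risks : List (List (String × String))) (out : String) : Decidable (Spec_format_risk_details_py risks out) := by unfold Spec_format_risk_details_py; infer_instance

-- ===== CLAIM (what is proved, stated in full; the proofs are below) =====
def Claim_equal_format_risk_details_py : Prop := ∀ (risks : List (List (String × String))), Dom_format_risk_details_py risks → Spec_format_risk_details_py risks (format_risk_details_py risks)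

-- ===== LEMMAS AND PROOFS =====

-- "".join on nil / cons / append
theorem pv_join_nil : PySem.Str.join "" ([] : List String) = "" := by
  simp [PySem.Str.join, PySem.Chars.join, List.intercalate]

theorem pv_join_cons (x : String) (xs : List String) :
    PySem.Str.join "" (x :: xs) = x ++ PySem.Str.join "" xs := by
  cases xs with
  | nil => simp [PySem.Str.join, PySem.Chars.join, List.intercalate]
  | cons y ys => simp [PySem.Str.join, PySem.Chars.join, List.intercalate, String.ofList_append]

theorem pv_join_append (l1 l2 : List String) :
    PySem.Str.join "" (l1 ++ l2) = PySem.Str.join "" l1 ++ PySem.Str.join "" l2 := by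
  induction l1 with
  | nil => simp [pv_join_nil]
  | cons x xs ih => simp [pv_join_cons, ih, String.append_assoc]

-- the two ports normalize severities and format entries identically
theorem pv_bKeep_eq (risk : List (String × String)) (sev : String) :
    bKeep risk sev = (aSeverity risk == sev) := by
  unfold bKeep aSeverity
  by_cases h : (PySem.Str.lower (PySem.Dict.getD (PySem.Dict.mk risk) "severity" "medium")) = "high" ∨
      (PySem.Str.lower (PySem.Dict.getD (PySem.Dict.mk risk) "severity" "medium")) = "medium" ∨
      (PySem.Str.lower (PySem.Dict.getD (PySem.Dict.mk risk) "severity" "medium")) = "low" <;>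
    simp [h]

theorem pv_bEntry_eq (risk : List (String × String)) : bEntry risk = aEntry risk := rfl

theorem pv_norm_cases (s : String) :
    (if ¬(s = "high" ∨ s = "medium" ∨ s = "low") then "medium" else s) = "high" ∨
    (if ¬(s = "high" ∨ s = "medium" ∨ s = "low") then "medium" else s) = "medium" ∨
    (if ¬(s = "high" ∨ s = "medium" ∨ s = "low") then "medium" else s) = "low" := by
  by_cases h : s = "high" ∨ s = "medium" ∨ s = "low"
  · rw [if_neg (not_not_intro h)]; exact h
  · rw [if_pos h]; exact Or.inr (Or.inl rfl)

theorem pv_aSeverity_cases (risk : List (String × String)) :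
    aSeverity risk = "high" ∨ aSeverity risk = "medium" ∨ aSeverity risk = "low" :=
  pv_norm_cases _

-- the group of entries for one severity
def pvGrp (sev : String) (risks : List (List (String × String))) : List String :=
  (risks.filter (fun r => aSeverity r == sev)).map aEntry

-- A's bucket fold computes the three groups
theorem pv_buckets (risks : List (List (String × String))) :
    ∀ (h m l : List String),
    risks.foldl (fun (bs : List String × List String × List String) risk =>
      let severity := aSeverity risk
      let entry := aEntry risk
      (if severity = "high" then bs.1 ++ [entry] else bs.1,
       if severity = "medium" then bs.2.1 ++ [entry] else bs.2.1,
       if severity = "low" then bs.2.2 ++ [entry] else bs.2.2)) (h, m, l)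
    = (h ++ pvGrp "high" risks, m ++ pvGrp "medium" risks, l ++ pvGrp "low" risks) := by
  induction risks with
  | nil => intro h m l; simp [pvGrp]
  | cons r rs ih =>
    intro h m l
    simp only [List.foldl_cons]
    rcases pv_aSeverity_cases r with hs | hs | hs <;>
      simp [ih, pvGrp, hs]

-- the three groups partition the risk list
theorem pv_total (risks : List (List (String × String))) :
    (pvGrp "high" risks).length + (pvGrp "medium" risks).length + (pvGrp "low" risks).length
      = risks.length := by
  induction risks with
  | nil => simp [pvGrp]
  | cons r rs ih =>
    rcases pv_aSeverity_cases r with hs | hs | hs <;>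
      simp [pvGrp, hs] at ih ⊢ <;> omega

-- the header string for one severity group
def pvHdr (sev : String) (g : List String) : String :=
  "\n" ++ PySem.Str.upper sev ++ " (" ++ PySem.Int.toStr (g.length : Int) ++ "):"

-- one severity's slice of A's lines list
def pvSegL (sev : String) (g : List String) : List String :=
  if g ≠ [] then pvHdr sev g :: g.map (fun r => "  - " ++ r) else []

-- one severity's text block
def pvSeg (sev : String) (g : List String) : String :=
  if g ≠ [] then pvHdr sev g ++ PySem.Str.join "" (g.map (fun r => "  - " ++ r)) else ""

theorem pv_join_segL (sev : String) (g : List String) :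
    PySem.Str.join "" (pvSegL sev g) = pvSeg sev g := by
  by_cases h : g = [] <;> simp [pvSegL, pvSeg, h, pv_join_cons, pv_join_nil]

theorem pv_segL_eq_nil_iff (sev : String) (g : List String) : pvSegL sev g = [] ↔ g = [] := by
  by_cases h : g = [] <;> simp [pvSegL, h]

-- one iteration of A's lines loop
theorem pv_stepA (lines g : List String) (sev : String) :
    (if g ≠ [] then
        g.foldl (fun ls r => ls ++ ["  - " ++ r])
          (lines ++ ["\n" ++ PySem.Str.upper sev ++ " (" ++ PySem.Int.toStr (g.length : Int) ++ "):"])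
      else lines) = lines ++ pvSegL sev g := by
  by_cases h : g = []
  · simp [pvSegL, h]
  · rw [if_pos h, PySem.List.foldl_append_singleton_eq_map]
    simp [pvSegL, pvHdr, h, List.append_assoc]

-- B's bullet-appending inner loop
theorem pv_fold_bullets (g : List String) :
    ∀ pre : String, g.foldl (fun o x => o ++ "  - " ++ x) pre
      = pre ++ PySem.Str.join "" (g.map (fun r => "  - " ++ r)) := by
  induction g with
  | nil => intro pre; simp [pv_join_nil]
  | cons x xs ih =>
    intro pre
    rw [List.foldl_cons, ih, List.map_cons, pv_join_cons]
    simp [String.append_assoc]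

-- one iteration of B's outer loop
theorem pv_stepB (out : String) (g : List String) (sev : String) :
    (if g ≠ [] then
        g.foldl (fun o x => o ++ "  - " ++ x)
          (out ++ ("\n" ++ PySem.Str.upper sev ++ " (" ++ PySem.Int.toStr (g.length : Int) ++ "):"))
      else out) = out ++ pvSeg sev g := by
  by_cases h : g = []
  · simp [pvSeg, h]
  · rw [if_pos h, pv_fold_bullets]
    simp [pvSeg, pvHdr, h, String.append_assoc]

-- B's per-severity filtering loop builds exactly A's bucket
theorem pv_groupB (risks : List (List (String × String))) (sev : String) :
    risks.foldl (fun g risk => if bKeep risk sev then g ++ [bEntry risk] else g) []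
      = pvGrp sev risks := by
  have h := PySem.List.foldl_append_if (l := risks) (p := fun r => bKeep r sev) (f := bEntry) (acc := [])
  simp only [List.nil_append] at h
  rw [h]
  unfold pvGrp
  rw [List.filter_congr (by intro r _; rw [pv_bKeep_eq])]
  exact List.map_congr_left (by intro r _; exact pv_bEntry_eq r)

-- ===== VERDICT (by name: the statement is the Claim_ definition above) =====

theorem format_risk_details_py_spec : Claim_equal_format_risk_details_py := by
  intro risks _
  unfold Spec_format_risk_details_py format_risk_details_py format_risk_details_py_alt
  by_cases hne : risks = []
  · simp [hne]
  · simp only [hne, if_false]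
    rw [pv_buckets risks [] [] []]
    simp only [List.nil_append]
    simp only [List.foldl_cons, List.foldl_nil, String.reduceEq, reduceIte]
    rw [pv_groupB, pv_groupB, pv_groupB]
    rw [pv_stepA, pv_stepA, pv_stepA, pv_stepB, pv_stepB, pv_stepB]
    have htot : ((pvGrp "high" risks).length : Int) + ((pvGrp "medium" risks).length : Int)
        + ((pvGrp "low" risks).length : Int) = (risks.length : Int) := by
      exact_mod_cast pv_total risks
    have hL : ([] : List String) ++ pvSegL "high" (pvGrp "high" risks)
        ++ pvSegL "medium" (pvGrp "medium" risks) ++ pvSegL "low" (pvGrp "low" risks) ≠ [] := by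
      intro h0
      simp only [List.nil_append, List.append_eq_nil_iff, pv_segL_eq_nil_iff] at h0
      obtain ⟨⟨h1, h2⟩, h3⟩ := h0
      have ht := pv_total risks
      rw [h1, h2, h3] at ht
      have hlen : risks.length = 0 := by simpa using ht.symm
      exact hne (List.length_eq_zero_iff.mp hlen)
    rw [if_pos hL, htot]
    simp only [List.nil_append]
    rw [pv_join_append, pv_join_append, pv_join_segL, pv_join_segL, pv_join_segL]
    simp [String.append_assoc]
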